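-- pv_equiv track=rewrite | github.com/86HenriqueSilva/Loteria_Analyzer | 03.analise_de_repetição_0000_a_9999_v2.py | obter_grupo_dezena
-- ===== SOURCE A (Python) =====
-- def obter_grupo_dezena(dezena):
--     tabela_grupos = {
--         "01": {"grupo": "AVESTRUZ", "dezenas": ["01", "02", "03", "04"]},
--         "02": {"grupo": "ÁGUIA", "dezenas": ["05", "06", "07", "08"]},
--         "03": {"grupo": "BURRO", "dezenas": ["09", "10", "11", "12"]},
--         "04": {"grupo": "BORBOLETA", "dezenas": ["13", "14", "15", "16"]},
--         "05": {"grupo": "CACHORRO", "dezenas": ["17", "18", "19", "20"]},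
--         "06": {"grupo": "CABRA", "dezenas": ["21", "22", "23", "24"]},
--         "07": {"grupo": "CARNEIRO", "dezenas": ["25", "26", "27", "28"]},
--         "08": {"grupo": "CAMELO", "dezenas": ["29", "30", "31", "32"]},
--         "09": {"grupo": "COBRA", "dezenas": ["33", "34", "35", "36"]},
--         "10": {"grupo": "COELHO", "dezenas": ["37", "38", "39", "40"]},
--         "11": {"grupo": "CAVALO", "dezenas": ["41", "42", "43", "44"]},
--         "12": {"grupo": "ELEFANTE", "dezenas": ["45", "46", "47", "48"]},
--         "13": {"grupo": "GALO", "dezenas": ["49", "50", "51", "52"]},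
--         "14": {"grupo": "GATO", "dezenas": ["53", "54", "55", "56"]},
--         "15": {"grupo": "JACARÉ", "dezenas": ["57", "58", "59", "60"]},
--         "16": {"grupo": "LEÃO", "dezenas": ["61", "62", "63", "64"]},
--         "17": {"grupo": "MACACO", "dezenas": ["65", "66", "67", "68"]},
--         "18": {"grupo": "PORCO", "dezenas": ["69", "70", "71", "72"]},
--         "19": {"grupo": "PAVÃO", "dezenas": ["73", "74", "75", "76"]},
--         "20": {"grupo": "PERU", "dezenas": ["77", "78", "79", "80"]},
--         "21": {"grupo": "TOURO", "dezenas": ["81", "82", "83", "84"]},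
--         "22": {"grupo": "TIGRE", "dezenas": ["85", "86", "87", "88"]},
--         "23": {"grupo": "URSO", "dezenas": ["89", "90", "91", "92"]},
--         "24": {"grupo": "VEADO", "dezenas": ["93", "94", "95", "96"]},
--         "25": {"grupo": "VACA", "dezenas": ["97", "98", "99", "00"]}
--     }
--
--     for grupo, info in tabela_grupos.items():
--         if dezena in info["dezenas"]:
--             return info["grupo"]
--     return "Desconhecido"
-- ===== SOURCE B (Python) =====
-- def obter_grupo_dezena(dezena):
--     animais = ["AVESTRUZ", "ÁGUIA", "BURRO", "BORBOLETA", "CACHORRO",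
--                "CABRA", "CARNEIRO", "CAMELO", "COBRA", "COELHO",
--                "CAVALO", "ELEFANTE", "GALO", "GATO", "JACARÉ",
--                "LEÃO", "MACACO", "PORCO", "PAVÃO", "PERU",
--                "TOURO", "TIGRE", "URSO", "VEADO", "VACA"]
--     if not isinstance(dezena, str) or len(dezena) != 2 \
--             or any(c not in "0123456789" for c in dezena):
--         return "Desconhecido"
--     n = int(dezena)
--     idx = 25 if n == 0 else (n - 1) // 4 + 1
--     return animais[idx - 1]
-- ===== Notes on version B (the rewrite author's own statement) =====
-- stated objective: simpler
-- what changed: B replaces A's scan of the 25-entry dict-of-lists with a two-ASCII-digit validity check plus the closed-form group index (n-1)//4 + 1 (25 for '00') into a flat list of names.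
import Mathlib
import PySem

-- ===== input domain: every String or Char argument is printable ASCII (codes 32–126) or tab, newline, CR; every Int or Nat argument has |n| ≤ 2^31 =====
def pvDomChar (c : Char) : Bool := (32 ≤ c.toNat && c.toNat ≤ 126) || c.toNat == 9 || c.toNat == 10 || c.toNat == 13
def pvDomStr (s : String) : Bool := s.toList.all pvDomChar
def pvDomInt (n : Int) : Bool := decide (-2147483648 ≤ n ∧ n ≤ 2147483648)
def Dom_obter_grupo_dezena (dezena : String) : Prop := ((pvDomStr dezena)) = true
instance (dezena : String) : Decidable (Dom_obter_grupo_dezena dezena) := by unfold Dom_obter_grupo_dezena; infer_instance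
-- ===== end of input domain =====

-- B replaces A's scan of the 25-entry group table by a validity check plus the
-- closed-form index (n-1)//4 + 1 (25 for "00") into a flat list of names (objective: simpler).

-- ===== PORT A =====
-- the dict of groups, in insertion order: (key, (group name, dezenas))
def pvTabelaA : List (String × String × List String) :=
  [("01", "AVESTRUZ", ["01", "02", "03", "04"]),
   ("02", "ÁGUIA", ["05", "06", "07", "08"]),
   ("03", "BURRO", ["09", "10", "11", "12"]),
   ("04", "BORBOLETA", ["13", "14", "15", "16"]),
   ("05", "CACHORRO", ["17", "18", "19", "20"]),
   ("06", "CABRA", ["21", "22", "23", "24"]),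
   ("07", "CARNEIRO", ["25", "26", "27", "28"]),
   ("08", "CAMELO", ["29", "30", "31", "32"]),
   ("09", "COBRA", ["33", "34", "35", "36"]),
   ("10", "COELHO", ["37", "38", "39", "40"]),
   ("11", "CAVALO", ["41", "42", "43", "44"]),
   ("12", "ELEFANTE", ["45", "46", "47", "48"]),
   ("13", "GALO", ["49", "50", "51", "52"]),
   ("14", "GATO", ["53", "54", "55", "56"]),
   ("15", "JACARÉ", ["57", "58", "59", "60"]),
   ("16", "LEÃO", ["61", "62", "63", "64"]),
   ("17", "MACACO", ["65", "66", "67", "68"]),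
   ("18", "PORCO", ["69", "70", "71", "72"]),
   ("19", "PAVÃO", ["73", "74", "75", "76"]),
   ("20", "PERU", ["77", "78", "79", "80"]),
   ("21", "TOURO", ["81", "82", "83", "84"]),
   ("22", "TIGRE", ["85", "86", "87", "88"]),
   ("23", "URSO", ["89", "90", "91", "92"]),
   ("24", "VEADO", ["93", "94", "95", "96"]),
   ("25", "VACA", ["97", "98", "99", "00"])]

-- the 'for grupo, info in tabela_grupos.items(): if dezena in info["dezenas"]: return info["grupo"]' loop
def pvLoopA : List (String × String × List String) → String → String
  | [], _ => "Desconhecido"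
  | (_, nome, ds) :: rest, s => if s ∈ ds then nome else pvLoopA rest s

def obter_grupo_dezena (dezena : String) : String := pvLoopA pvTabelaA dezena

-- ===== PORT B =====
def pvAnimais : List String :=
  ["AVESTRUZ", "ÁGUIA", "BURRO", "BORBOLETA", "CACHORRO",
   "CABRA", "CARNEIRO", "CAMELO", "COBRA", "COELHO",
   "CAVALO", "ELEFANTE", "GALO", "GATO", "JACARÉ",
   "LEÃO", "MACACO", "PORCO", "PAVÃO", "PERU",
   "TOURO", "TIGRE", "URSO", "VEADO", "VACA"]

def obter_grupo_dezena_alt (dezena : String) : String :=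
  -- guard: len(dezena) == 2 and every char in "0123456789"
  if dezena.toList.length == 2 && dezena.toList.all (fun c => c ∈ "0123456789".toList) then
    -- n = int(dezena): on a validated two-digit string this is exact
    let n : Int := (PySem.Int.ofStr? dezena).getD 0
    let idx : Int := if n == 0 then 25 else PySem.Int.floordiv (n - 1) 4 + 1
    -- animais[idx - 1]: idx ∈ 1..25 so the index is always in range (the none branch is unreachable)
    (PySem.List.pyGet? pvAnimais (idx - 1)).getD "Desconhecido"
  else "Desconhecido"

-- ===== PRECONDITION & SPEC =====
def Spec_obter_grupo_dezena (dezena : String) (out : String) : Prop := out = obter_grupo_dezena_alt dezena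
instance (dezena : String) (out : String) : Decidable (Spec_obter_grupo_dezena dezena out) := by unfold Spec_obter_grupo_dezena; infer_instance

-- ===== CLAIM (what is proved, stated in full; the proofs are below) =====
def Claim_equal_obter_grupo_dezena : Prop := ∀ (dezena : String), Dom_obter_grupo_dezena dezena → Spec_obter_grupo_dezena dezena (obter_grupo_dezena dezena)

-- ===== LEMMAS AND PROOFS =====

-- B's validity gate, as a predicate on strings
def pvDigitPair (s : String) : Bool :=
  s.toList.length == 2 && s.toList.all (fun c => c ∈ "0123456789".toList)

-- every dezena in A's table passes B's gate
theorem pvTabela_digitPair : ∀ e ∈ pvTabelaA, ∀ d ∈ e.2.2, pvDigitPair d = true := by decide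

theorem pvLoopA_nomatch (t : List (String × String × List String)) (s : String)
    (h : ∀ e ∈ t, s ∉ e.2.2) : pvLoopA t s = "Desconhecido" := by
  induction t with
  | nil => rfl
  | cons e rest ih =>
    obtain ⟨k, nome, ds⟩ := e
    simp only [pvLoopA]
    rw [if_neg (h (k, nome, ds) (List.mem_cons_self ..))]
    exact ih fun e he => h e (List.mem_cons_of_mem _ he)

-- ===== VERDICT (by name: the statement is the Claim_ definition above) =====
theorem obter_grupo_dezena_spec : Claim_equal_obter_grupo_dezena := by
  intro s _
  unfold Spec_obter_grupo_dezena
  by_cases hq : pvDigitPair s = true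
  · -- s is a two-digit string: enumerate the 100 cases
    unfold pvDigitPair at hq
    rcases hs : s.toList with _ | ⟨a, _ | ⟨b, _ | ⟨c, t⟩⟩⟩ <;> rw [hs] at hq <;> simp at hq
    have hsl : s = String.ofList [a, b] := by
      have := congrArg String.ofList hs; simpa using this
    subst hsl
    obtain ⟨ha, hb⟩ := hq
    rcases ha with rfl|rfl|rfl|rfl|rfl|rfl|rfl|rfl|rfl|rfl <;>
      rcases hb with rfl|rfl|rfl|rfl|rfl|rfl|rfl|rfl|rfl|rfl <;> decide
  · -- s is not a two-digit string: both sides return "Desconhecido"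
    have hB : obter_grupo_dezena_alt s = "Desconhecido" := by
      unfold obter_grupo_dezena_alt
      rw [if_neg (by exact hq)]
    have hA : obter_grupo_dezena s = "Desconhecido" := by
      apply pvLoopA_nomatch
      intro e he hmem
      exact hq (pvTabela_digitPair e he s hmem)
    rw [hA, hB]
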